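-- pv_equiv track=rewrite | github.com/ShuxiangCao/LeeQ | scripts/validate_tutorial_steps.py | _validate_section_progression
-- ===== SOURCE A (Python) =====
-- from typing import Dict, List, Optional, Tuple, Any
--
-- def _validate_section_progression(section_order: List[str]) -> List[str]:
--     """Validate logical progression of tutorial sections."""
--     issues = []
--
--     # Define expected progression patterns
--     basic_concepts = ['Parameter Storage', 'DUT Object', 'Collection', 'Measurement Primitives']
--     intermediate_concepts = ['Orchestrating Pulses', 'Single Qubit Operations']
--     advanced_concepts = ['Customizing', 'Creating']
--
--     # Check if basic concepts come before advanced ones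
--     basic_found = False
--     advanced_found = False
--
--     for section in section_order:
--         if any(concept in section for concept in basic_concepts):
--             basic_found = True
--         elif any(concept in section for concept in advanced_concepts):
--             if not basic_found:
--                 issues.append(f"Advanced concept '{section}' appears before basic concepts")
--             advanced_found = True
--
--     return issues
-- ===== SOURCE B (Python) =====
-- from typing import List
--
-- def _validate_section_progression(section_order: List[str]) -> List[str]:
--     """Validate logical progression of tutorial sections."""
--     basic_concepts = ['Parameter Storage', 'DUT Object', 'Collection', 'Measurement Primitives']
--     advanced_concepts = ['Customizing', 'Creating']
--
--     first_basic = next((i for i, s in enumerate(section_order)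
--                         if any(c in s for c in basic_concepts)), len(section_order))
--     return [f"Advanced concept '{s}' appears before basic concepts"
--             for s in section_order[:first_basic]
--             if any(c in s for c in advanced_concepts)]
-- ===== Notes on version B (the rewrite author's own statement) =====
-- stated objective: simpler
-- what changed: Replaces the flag-threading single pass with computing the index of the first basic-concept section and a comprehension over just that prefix that maps advanced sections to issue messages; drops the unused intermediate_concepts and advanced_found.
import Mathlib
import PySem

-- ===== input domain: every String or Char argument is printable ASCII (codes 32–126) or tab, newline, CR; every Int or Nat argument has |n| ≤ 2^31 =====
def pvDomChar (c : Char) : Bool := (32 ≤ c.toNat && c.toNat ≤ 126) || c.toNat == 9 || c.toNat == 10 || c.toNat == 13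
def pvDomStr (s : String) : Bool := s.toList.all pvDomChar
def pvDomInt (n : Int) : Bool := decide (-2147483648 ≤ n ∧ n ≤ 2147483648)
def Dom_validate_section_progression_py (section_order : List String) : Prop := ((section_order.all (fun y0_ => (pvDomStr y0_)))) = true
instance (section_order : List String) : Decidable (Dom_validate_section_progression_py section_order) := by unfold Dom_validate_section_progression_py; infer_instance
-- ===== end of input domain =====

-- B replaces A's flag-threading single pass with a first-basic-index computation plus a prefix-only comprehension (objective: simpler).


-- ===== PORT A =====
def vspA_basic : List String := ["Parameter Storage", "DUT Object", "Collection", "Measurement Primitives"]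
-- (A also defines intermediate_concepts = ['Orchestrating Pulses', 'Single Qubit Operations'], never read; omitted here)
def vspA_advanced : List String := ["Customizing", "Creating"]

-- loop state: (issues, basic_found, advanced_found)
def vspA_step (st : List String × Bool × Bool) (section_ : String) : List String × Bool × Bool :=
  if vspA_basic.any (fun concept => PySem.Str.isIn concept section_) then
    (st.1, true, st.2.2)
  else if vspA_advanced.any (fun concept => PySem.Str.isIn concept section_) then
    ((if !st.2.1 then st.1 ++ ["Advanced concept '" ++ section_ ++ "' appears before basic concepts"] else st.1),
     st.2.1, true)
  else st

def validate_section_progression_py (section_order : List String) : List String :=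
  (section_order.foldl vspA_step ([], false, false)).1

-- ===== PORT B =====
def vspB_basic : List String := ["Parameter Storage", "DUT Object", "Collection", "Measurement Primitives"]
def vspB_advanced : List String := ["Customizing", "Creating"]

def validate_section_progression_py_alt (section_order : List String) : List String :=
  let first_basic := section_order.findIdx (fun s => vspB_basic.any (fun c => PySem.Str.isIn c s))
  ((section_order.take first_basic).filter
      (fun s => vspB_advanced.any (fun c => PySem.Str.isIn c s))).map
    (fun s => "Advanced concept '" ++ s ++ "' appears before basic concepts")

-- ===== PRECONDITION & SPEC =====
def Spec_validate_section_progression_py (section_order : List String) (out : List String) : Prop := out = validate_section_progression_py_alt section_order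
instance (section_order : List String) (out : List String) : Decidable (Spec_validate_section_progression_py section_order out) := by unfold Spec_validate_section_progression_py; infer_instance

-- ===== CLAIM (what is proved, stated in full; the proofs are below) =====
def Claim_equal_validate_section_progression_py : Prop := ∀ (section_order : List String), Dom_validate_section_progression_py section_order → Spec_validate_section_progression_py section_order (validate_section_progression_py section_order)

-- ===== LEMMAS AND PROOFS =====

lemma vspA_fold_true (l : List String) (issues : List String) (af : Bool) :
    (l.foldl vspA_step (issues, true, af)).1 = issues := by
  induction l generalizing af with
  | nil => rfl
  | cons s t ih =>
      simp only [List.foldl_cons, vspA_step]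
      split_ifs with h1 h2 h3 <;> first | exact ih _ | (exfalso; simp_all)

lemma vspA_step_false (issues : List String) (af : Bool) (s : String) :
    vspA_step (issues, false, af) s =
      if vspA_basic.any (fun c => PySem.Str.isIn c s) then (issues, true, af)
      else if vspA_advanced.any (fun c => PySem.Str.isIn c s) then
        (issues ++ ["Advanced concept '" ++ s ++ "' appears before basic concepts"], false, true)
      else (issues, false, af) := by
  simp [vspA_step]

lemma vspB_alt_cons (s : String) (t : List String) :
    validate_section_progression_py_alt (s :: t) =
      if vspA_basic.any (fun c => PySem.Str.isIn c s) then []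
      else (if vspA_advanced.any (fun c => PySem.Str.isIn c s) then
              ["Advanced concept '" ++ s ++ "' appears before basic concepts"] else [])
            ++ validate_section_progression_py_alt t := by
  simp only [validate_section_progression_py_alt, List.findIdx_cons,
    show vspB_basic = vspA_basic from rfl, show vspB_advanced = vspA_advanced from rfl]
  by_cases hb : (vspA_basic.any fun c => PySem.Str.isIn c s) = true
  · simp only [hb]; simp
  · rw [Bool.not_eq_true] at hb
    by_cases ha : (vspA_advanced.any fun c => PySem.Str.isIn c s) = true
    · have ha' : (vspA_advanced.any fun c => PySem.Chars.isIn c.toList s.toList) = true := by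
        simpa [PySem.Str.isIn] using ha
      simp only [hb, ha]; simp [ha']
    · rw [Bool.not_eq_true] at ha
      have ha' : (vspA_advanced.any fun c => PySem.Chars.isIn c.toList s.toList) = false := by
        simpa [PySem.Str.isIn] using ha
      simp only [hb, ha]; simp [ha']

lemma vspA_fold_false (l : List String) (issues : List String) (af : Bool) :
    (l.foldl vspA_step (issues, false, af)).1 = issues ++ validate_section_progression_py_alt l := by
  induction l generalizing issues af with
  | nil => simp [validate_section_progression_py_alt]
  | cons s t ih =>
      rw [List.foldl_cons, vspA_step_false, vspB_alt_cons]
      split_ifs with h1 h2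
      · simp [vspA_fold_true]
      · simp [ih]
      · simp [ih]

-- ===== VERDICT (by name: the statement is the Claim_ definition above) =====
theorem validate_section_progression_py_spec : Claim_equal_validate_section_progression_py := by
  intro l _
  show _ = _
  simpa using vspA_fold_false l [] false
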